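-- pv_equiv track=rewrite | github.com/bit-shift/resty-notes | resty-notes.py | find_fuzzy_matches
-- ===== SOURCE A (Python) =====
-- def find_fuzzy_matches(fragment, strings, case_sensitive=False):
--     """find_fuzzy_matches(fragment, [string], case_sensitive=False) -> [string]
--
-- Given a list of strings, return a list of those where the non-empty
-- fragment has all its characters appear in order. If case_sensitive is
-- False (default), uppercase characters will match lowercase versions,
-- and vice versa."""
--     if len(fragment) == 0:
--         return []
--     matches = []
--     for string in strings:
--         fragment_index = 0
--         for char in string:
--             if (case_sensitive and char == fragment[fragment_index]) or ((not case_sensitive) and char.lower() == fragment[fragment_index].lower()):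
--                 fragment_index += 1
--             if fragment_index == len(fragment): # all chars existed in order, this is a fuzzy match
--                 matches.append(string)
--                 break
--     return matches
-- ===== SOURCE B (Python) =====
-- def _bisect_left(a, x):
--     # first index k with a[k] >= x (a sorted ascending), by binary search
--     lo = 0
--     hi = len(a)
--     while lo < hi:
--         mid = (lo + hi) // 2
--         if a[mid] < x:
--             lo = mid + 1
--         else:
--             hi = mid
--     return lo
--
--
-- def _occurrence_index(chars):
--     # char -> ascending list of positions where it occurs
--     index = {}
--     i = 0
--     for c in chars:
--         index.setdefault(c, []).append(i)
--         i += 1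
--     return index
--
--
-- def _matches(frag, chars):
--     # subsequence test driven by the occurrence index: for each fragment
--     # char, binary-search its position list for the first occurrence at or
--     # after the current cursor.
--     index = _occurrence_index(chars)
--     pos = 0
--     for fc in frag:
--         occ = index.get(fc, [])
--         k = _bisect_left(occ, pos)
--         if k == len(occ):
--             return False
--         pos = occ[k] + 1
--     return True
--
--
-- def find_fuzzy_matches(fragment, strings, case_sensitive=False):
--     if not fragment:
--         return []
--     if case_sensitive:
--         frag = list(fragment)
--         return [s for s in strings if _matches(frag, list(s))]
--     frag = [c.lower() for c in fragment]
--     return [s for s in strings if _matches(frag, [c.lower() for c in s])]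
-- ===== Notes on version B (the rewrite author's own statement) =====
-- stated objective: alternative
-- what changed: Instead of A's per-string pointer walk over the characters, B builds a char-to-ascending-positions occurrence index for each string and answers each fragment character by binary-searching that char's position list for the first occurrence at or after the cursor.
import Mathlib
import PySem

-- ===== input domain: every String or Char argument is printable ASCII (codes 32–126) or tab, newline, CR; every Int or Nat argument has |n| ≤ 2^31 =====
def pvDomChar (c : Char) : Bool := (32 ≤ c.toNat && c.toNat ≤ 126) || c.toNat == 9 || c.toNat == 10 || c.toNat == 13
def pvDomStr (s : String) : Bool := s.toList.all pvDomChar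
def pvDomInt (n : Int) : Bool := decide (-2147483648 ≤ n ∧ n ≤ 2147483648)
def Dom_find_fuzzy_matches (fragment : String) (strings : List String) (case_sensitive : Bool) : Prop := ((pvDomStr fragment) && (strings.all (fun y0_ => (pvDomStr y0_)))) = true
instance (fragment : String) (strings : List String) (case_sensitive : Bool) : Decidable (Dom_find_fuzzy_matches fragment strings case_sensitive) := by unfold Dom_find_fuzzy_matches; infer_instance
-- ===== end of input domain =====

-- B replaces A's per-string pointer scan with an occurrence index (char -> ascending
-- position list) queried by hand-written binary search per fragment char (alternative algorithm, same measured cost).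


-- ===== PORT A =====
-- A's inner per-string loop: walk the string's characters keeping fragment_index;
-- on reaching len(fragment) return true ("append and break").
-- fragment_index is always < frag.length when frag[fragment_index] is read, so
-- List.getD is exact (the default is never used); Char.toLower is exact for
-- Python's str.lower on the ASCII domain.
def pvAScan (frag : List Char) (cs : Bool) : List Char → Nat → Bool
  | [], _ => false
  | c :: rest, i =>
      let i' := if (cs && (c == frag.getD i 'a')) ||
                   (!cs && (c.toLower == (frag.getD i 'a').toLower)) then i + 1 else i
      if i' = frag.length then true else pvAScan frag cs rest i'

def find_fuzzy_matches (fragment : String) (strings : List String) (case_sensitive : Bool) : List String :=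
  if fragment.toList.length = 0 then []
  else
    strings.foldl (fun acc s =>
      if pvAScan fragment.toList case_sensitive s.toList 0 then acc ++ [s] else acc) []

-- ===== PORT B =====
-- Source B's _bisect_left: the while-loop as recursion on hi - lo; a[mid] is in range
-- whenever hi ≤ a.length, so getD is exact there.
def pvBisectLoop (a : List Nat) (x : Nat) (lo hi : Nat) : Nat :=
  if lo < hi then
    let mid := (lo + hi) / 2
    if a.getD mid 0 < x then pvBisectLoop a x (mid + 1) hi else pvBisectLoop a x lo mid
  else lo
termination_by hi - lo
decreasing_by all_goals omega

-- Source B's _occurrence_index: one pass over the chars carrying (dict, running index i);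
-- setdefault(c, []).append(i) = overwrite-in-place insert of the extended list.
def pvOccIndex (chars : List Char) : PySem.Dict Char (List Nat) :=
  (chars.foldl (fun (st : PySem.Dict Char (List Nat) × Nat) c =>
      (st.1.insert c (st.1.getD c [] ++ [st.2]), st.2 + 1)) (PySem.Dict.empty, 0)).1

-- Source B's _matches loop over the fragment chars (early return False = stop with false)
def pvMatchLoop (index : PySem.Dict Char (List Nat)) : List Char → Nat → Bool
  | [], _ => true
  | fc :: fs, pos =>
      let occ := index.getD fc []
      let k := pvBisectLoop occ pos 0 occ.length
      if k = occ.length then false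
      else pvMatchLoop index fs (occ.getD k 0 + 1)

def pvMatches (frag chars : List Char) : Bool :=
  pvMatchLoop (pvOccIndex chars) frag 0

def find_fuzzy_matches_alt (fragment : String) (strings : List String) (case_sensitive : Bool) : List String :=
  if fragment.toList.isEmpty then []
  else if case_sensitive then
    strings.filter (fun s => pvMatches fragment.toList s.toList)
  else
    strings.filter (fun s =>
      pvMatches (fragment.toList.map Char.toLower) (s.toList.map Char.toLower))

-- ===== PRECONDITION & SPEC =====
def Spec_find_fuzzy_matches (fragment : String) (strings : List String) (case_sensitive : Bool) (out : List String) : Prop := out = find_fuzzy_matches_alt fragment strings case_sensitive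
instance (fragment : String) (strings : List String) (case_sensitive : Bool) (out : List String) : Decidable (Spec_find_fuzzy_matches fragment strings case_sensitive out) := by unfold Spec_find_fuzzy_matches; infer_instance

-- ===== CLAIM (what is proved, stated in full; the proofs are below) =====
def Claim_equal_find_fuzzy_matches : Prop := ∀ (fragment : String) (strings : List String) (case_sensitive : Bool), Dom_find_fuzzy_matches fragment strings case_sensitive → Spec_find_fuzzy_matches fragment strings case_sensitive (find_fuzzy_matches fragment strings case_sensitive)

-- ===== LEMMAS AND PROOFS =====

-- the case fold each side applies to one character
def pvLw (cs : Bool) (c : Char) : Char := if cs then c else c.toLower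

theorem pvLw_true : pvLw true = fun c => c := by funext c; simp [pvLw]

theorem pvLw_false : pvLw false = Char.toLower := by funext c; simp [pvLw]

-- proof-side reference subsequence check (head-greedy recursion on the string)
def pvBSub : List Char → List Char → Bool
  | [], _ => true
  | _ :: _, [] => false
  | f :: fs, c :: ss => if f == c then pvBSub fs ss else pvBSub (f :: fs) ss

theorem pvAScan_eq_bSub (frag : List Char) (cs : Bool) :
    ∀ (s : List Char) (i : Nat), i < frag.length →
      pvAScan frag cs s i
        = pvBSub (List.map (pvLw cs) (frag.drop i)) (List.map (pvLw cs) s) := by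
  intro s
  induction s with
  | nil =>
      intro i hi
      rw [List.drop_eq_getElem_cons hi, List.map_cons, List.map_nil]
      rfl
  | cons c ss ih =>
      intro i hi
      have hgetD : frag.getD i 'a' = frag[i] := List.getD_eq_getElem frag 'a' hi
      have hcond : ((cs && (c == frag.getD i 'a')) ||
          (!cs && (c.toLower == (frag.getD i 'a').toLower)))
          = (pvLw cs frag[i] == pvLw cs c) := by
        rw [hgetD]; cases cs <;> simp [pvLw, eq_comm]
      rw [List.drop_eq_getElem_cons hi, List.map_cons, List.map_cons]
      by_cases h : (pvLw cs frag[i] == pvLw cs c) = true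
      · by_cases hlen : i + 1 = frag.length
        · have hdrop : frag.drop (i + 1) = ([] : List Char) :=
            List.drop_eq_nil_of_le (le_of_eq hlen.symm)
          simp only [pvAScan, pvBSub, hcond, h, if_true, hlen, List.drop_length,
            List.map_nil]
        · have hlt : i + 1 < frag.length := lt_of_le_of_ne hi hlen
          simp only [pvAScan, pvBSub, hcond, h, if_true, hlen, if_false]
          rw [ih (i + 1) hlt]
      · have hne : ¬ (i = frag.length) := Nat.ne_of_lt hi
        simp only [pvAScan, pvBSub, hcond, h, Bool.false_eq_true, if_false, hne]
        rw [ih i hi, List.drop_eq_getElem_cons hi, List.map_cons]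

-- positions (counting from i) where char c occurs in a char list
def pvOccList (c : Char) : List Char → Nat → List Nat
  | [], _ => []
  | x :: xs, i => if x == c then i :: pvOccList c xs (i + 1) else pvOccList c xs (i + 1)

theorem pvOccIndex_fold (c : Char) :
    ∀ (chars : List Char) (d : PySem.Dict Char (List Nat)) (i : Nat),
      ((chars.foldl (fun (st : PySem.Dict Char (List Nat) × Nat) ch =>
          (st.1.insert ch (st.1.getD ch [] ++ [st.2]), st.2 + 1)) (d, i)).1).getD c []
        = d.getD c [] ++ pvOccList c chars i := by
  intro chars
  induction chars with
  | nil => intro d i; simp [pvOccList]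
  | cons x xs ih =>
      intro d i
      simp only [List.foldl_cons]
      rw [ih]
      by_cases h : x = c
      · subst h
        rw [PySem.Dict.getD_insert]
        simp [pvOccList]
      · rw [PySem.Dict.getD_insert]
        simp [pvOccList, h, Ne.symm h]

theorem pvOccIndex_getD (chars : List Char) (c : Char) :
    (pvOccIndex chars).getD c [] = pvOccList c chars 0 := by
  have h := pvOccIndex_fold c chars PySem.Dict.empty 0
  simpa [pvOccIndex, PySem.Dict.getD_empty] using h

theorem pvOccList_mem (c : Char) :
    ∀ (chars : List Char) (i m : Nat),
      m ∈ pvOccList c chars i ↔ ∃ (j : Nat) (h : j < chars.length), chars[j] = c ∧ m = i + j := by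
  intro chars
  induction chars with
  | nil => intro i m; simp [pvOccList]
  | cons x xs ih =>
      intro i m
      by_cases h : x = c
      · subst h
        simp only [pvOccList, beq_self_eq_true, if_true, List.mem_cons, ih]
        constructor
        · rintro (rfl | ⟨j, hj, hc, rfl⟩)
          · exact ⟨0, by simp, by simp, by omega⟩
          · exact ⟨j + 1, by simpa using hj, by simpa using hc, by omega⟩
        · rintro ⟨j, hj, hc, rfl⟩
          cases j with
          | zero => left; omega
          | succ j' => right; exact ⟨j', by simpa using hj, by simpa using hc, by omega⟩
      · have hbe : (x == c) = false := by simp [h]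
        simp only [pvOccList, hbe, Bool.false_eq_true, if_false, ih]
        constructor
        · rintro ⟨j, hj, hc, rfl⟩
          exact ⟨j + 1, by simpa using hj, by simpa using hc, by omega⟩
        · rintro ⟨j, hj, hc, rfl⟩
          cases j with
          | zero => exact absurd (by simpa using hc) h
          | succ j' => exact ⟨j', by simpa using hj, by simpa using hc, by omega⟩

theorem pvOccList_ge (c : Char) :
    ∀ (chars : List Char) (i m : Nat), m ∈ pvOccList c chars i → i ≤ m := by
  intro chars i m hm
  rcases (pvOccList_mem c chars i m).mp hm with ⟨j, _, _, rfl⟩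
  omega

theorem pvOccList_sorted (c : Char) :
    ∀ (chars : List Char) (i : Nat), (pvOccList c chars i).Pairwise (· < ·) := by
  intro chars
  induction chars with
  | nil => intro i; simp [pvOccList]
  | cons x xs ih =>
      intro i
      by_cases h : (x == c) = true
      · simp only [pvOccList, h, if_true]
        refine List.Pairwise.cons (fun m hm => ?_) (ih (i + 1))
        have := pvOccList_ge c xs (i + 1) m hm
        omega
      · simp only [pvOccList, h, Bool.false_eq_true, if_false]
        exact ih (i + 1)

theorem pvBisect_spec (a : List Nat) (x : Nat)
    (hsort : ∀ (i j : Nat), (hij : i ≤ j) → (h : j < a.length) → a[i]'(Nat.lt_of_le_of_lt hij h) ≤ a[j]) :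
    ∀ (n lo hi : Nat), hi - lo = n → lo ≤ hi → hi ≤ a.length →
      (∀ j, j < lo → (h : j < a.length) → a[j] < x) →
      (∀ j, hi ≤ j → (h : j < a.length) → x ≤ a[j]) →
      pvBisectLoop a x lo hi ≤ a.length ∧
      (∀ j, j < pvBisectLoop a x lo hi → (h : j < a.length) → a[j] < x) ∧
      (∀ j, pvBisectLoop a x lo hi ≤ j → (h : j < a.length) → x ≤ a[j]) := by
  intro n
  induction n using Nat.strong_induction_on with
  | _ n ih =>
    intro lo hi hn hlohi hhi hlow hup
    rw [pvBisectLoop]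
    by_cases hlt : lo < hi
    · rw [if_pos hlt]
      simp only
      have hmid1 : lo ≤ (lo + hi) / 2 := by omega
      have hmid2 : (lo + hi) / 2 < hi := by omega
      have hmidlen : (lo + hi) / 2 < a.length := by omega
      have hget : a.getD ((lo + hi) / 2) 0 = a[(lo + hi) / 2] :=
        List.getD_eq_getElem a 0 hmidlen
      by_cases hcmp : a.getD ((lo + hi) / 2) 0 < x
      · rw [if_pos hcmp]
        refine ih (hi - ((lo + hi) / 2 + 1)) (by omega) _ _ rfl (by omega) hhi ?_ hup
        intro j hj h
        have : a[j] ≤ a[(lo + hi) / 2] := hsort j _ (by omega) hmidlen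
        rw [hget] at hcmp
        omega
      · rw [if_neg hcmp]
        rw [hget] at hcmp
        refine ih ((lo + hi) / 2 - lo) (by omega) _ _ rfl (by omega) (by omega) hlow ?_
        intro j hj h
        have : a[(lo + hi) / 2] ≤ a[j] := hsort _ j hj h
        omega
    · rw [if_neg hlt]
      have : lo = hi := by omega
      subst this
      exact ⟨by omega, hlow, fun j hj h => hup j hj h⟩

theorem pvBSub_not_mem (f : Char) (fs : List Char) :
    ∀ (l : List Char), f ∉ l → pvBSub (f :: fs) l = false := by
  intro l
  induction l with
  | nil => intro _; rfl
  | cons c ss ih =>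
      intro h
      have h1 : f ≠ c := fun he => h (he ▸ List.mem_cons_self)
      have h2 : f ∉ ss := fun he => h (List.mem_cons_of_mem _ he)
      simp only [pvBSub, beq_iff_eq, h1, if_false]
      exact ih h2

theorem pvBSub_step (f : Char) (fs chars : List Char) :
    ∀ (n pos j : Nat), j - pos = n → pos ≤ j → (hj : j < chars.length) → chars[j] = f →
    (∀ p, pos ≤ p → p < j → (hp : p < chars.length) → chars[p] ≠ f) →
    pvBSub (f :: fs) (chars.drop pos) = pvBSub fs (chars.drop (j + 1)) := by
  intro n
  induction n with
  | zero =>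
      intro pos j hn hpj hj hc _
      have : pos = j := by omega
      subst this
      rw [List.drop_eq_getElem_cons hj]
      simp only [pvBSub, hc, beq_self_eq_true, if_true]
  | succ n ih =>
      intro pos j hn hpj hj hc hmin
      have hposlt : pos < j := by omega
      have hposlen : pos < chars.length := by omega
      rw [List.drop_eq_getElem_cons hposlen]
      have hne : (f == chars[pos]) = false :=
        beq_eq_false_iff_ne.mpr (fun he => hmin pos le_rfl hposlt hposlen he.symm)
      rw [show pvBSub (f :: fs) (chars[pos] :: chars.drop (pos + 1)) = pvBSub (f :: fs) (chars.drop (pos + 1)) by simp [pvBSub, hne]]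
      exact ih (pos + 1) j (by omega) (by omega) hj hc
        (fun p hp1 hp2 hp3 => hmin p (by omega) hp2 hp3)

theorem pvMatchLoop_eq_bSub (chars : List Char) :
    ∀ (frag : List Char) (pos : Nat),
      pvMatchLoop (pvOccIndex chars) frag pos = pvBSub frag (chars.drop pos) := by
  intro frag
  induction frag with
  | nil => intro pos; simp only [pvMatchLoop, pvBSub]
  | cons fc fs ih =>
      intro pos
      rw [pvMatchLoop]
      simp only [pvOccIndex_getD]
      set occ := pvOccList fc chars 0 with hocc
      have hpair : occ.Pairwise (· < ·) := pvOccList_sorted fc chars 0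
      have hsort : ∀ (i j : Nat), (hij : i ≤ j) → (h : j < occ.length) →
          occ[i]'(Nat.lt_of_le_of_lt hij h) ≤ occ[j] := by
        intro i j hij h
        rcases Nat.lt_or_ge i j with hlt | hge
        · exact le_of_lt ((List.pairwise_iff_getElem.mp hpair) i j _ h hlt)
        · have : i = j := by omega
          subst this; exact le_rfl
      obtain ⟨hk1, hk2, hk3⟩ := pvBisect_spec occ pos hsort (occ.length - 0) 0 occ.length rfl
        (by omega) le_rfl (by omega) (by intro j hj h; omega)
      set k := pvBisectLoop occ pos 0 occ.length with hk
      have hmemchar : ∀ m, m ∈ occ ↔ ∃ (h : m < chars.length), chars[m] = fc := by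
        intro m
        rw [hocc, pvOccList_mem]
        constructor
        · rintro ⟨j, hj, hc, rfl⟩; exact ⟨by simpa using hj, by simpa using hc⟩
        · rintro ⟨h, hc⟩; exact ⟨m, h, hc, by omega⟩
      by_cases hkl : k = occ.length
      · rw [if_pos hkl]
        have hnot : fc ∉ chars.drop pos := by
          intro hmem
          rcases List.mem_iff_getElem.mp hmem with ⟨idx, hidx, hgi⟩
          have hlen : pos + idx < chars.length := by
            have := List.length_drop (l := chars) (i := pos); omega
          have hgi' : chars[pos + idx] = fc := by
            rw [← List.getElem_drop]; exact hgi
          have hmemocc : pos + idx ∈ occ := (hmemchar _).mpr ⟨hlen, hgi'⟩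
          rcases List.mem_iff_getElem.mp hmemocc with ⟨j', hj', hje⟩
          have := hk2 j' (by omega) hj'
          omega
        exact (pvBSub_not_mem fc fs _ hnot).symm
      · rw [if_neg hkl]
        have hklt : k < occ.length := by omega
        have hgetD : occ.getD k 0 = occ[k] := List.getD_eq_getElem occ 0 hklt
        have hjk : pos ≤ occ[k] := hk3 k le_rfl hklt
        obtain ⟨hjlen, hjc⟩ := (hmemchar occ[k]).mp (List.getElem_mem hklt)
        have hmin : ∀ p, pos ≤ p → p < occ[k] → (hp : p < chars.length) → chars[p] ≠ fc := by
          intro p hp1 hp2 hp3 hpe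
          have hpm : p ∈ occ := (hmemchar p).mpr ⟨hp3, hpe⟩
          rcases List.mem_iff_getElem.mp hpm with ⟨j', hj', hje⟩
          rcases Nat.lt_or_ge j' k with hlt | hge
          · have := hk2 j' hlt hj'
            omega
          · have : occ[k] ≤ occ[j'] := hsort k j' hge hj'
            omega
        rw [hgetD, ih (occ[k] + 1)]
        exact (pvBSub_step fc fs chars (occ[k] - pos) pos occ[k] rfl hjk hjlen hjc hmin).symm


theorem pvMatches_eq_bSub (frag chars : List Char) :
    pvMatches frag chars = pvBSub frag chars := by
  have h := pvMatchLoop_eq_bSub chars frag 0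
  simpa [pvMatches] using h

-- ===== VERDICT (by name: the statement is the Claim_ definition above) =====
theorem find_fuzzy_matches_spec : Claim_equal_find_fuzzy_matches := by
  intro fragment strings case_sensitive _
  unfold Spec_find_fuzzy_matches find_fuzzy_matches find_fuzzy_matches_alt
  by_cases h0 : fragment.toList.length = 0
  · have hnil : fragment.toList = [] := List.length_eq_zero_iff.mp h0
    rw [if_pos h0, if_pos (by simp [hnil])]
  · have hpos : 0 < fragment.toList.length := Nat.pos_of_ne_zero h0
    have hnil : fragment.toList ≠ [] := by
      intro h; rw [h] at h0; exact h0 rfl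
    rw [if_neg h0, if_neg (by simpa [List.isEmpty_iff] using hnil)]
    rw [PySem.List.foldl_append_if_eq_filter]
    rw [List.nil_append]
    cases case_sensitive with
    | true =>
        rw [if_pos rfl]
        refine List.filter_congr (fun s _ => ?_)
        have h := pvAScan_eq_bSub fragment.toList true s.toList 0 hpos
        rw [pvLw_true, List.map_id', List.map_id'] at h
        simp only [List.drop_zero] at h
        rw [h, pvMatches_eq_bSub]
    | false =>
        rw [if_neg (by simp)]
        refine List.filter_congr (fun s _ => ?_)
        have h := pvAScan_eq_bSub fragment.toList false s.toList 0 hpos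
        rw [pvLw_false] at h
        simp only [List.drop_zero] at h
        rw [h, pvMatches_eq_bSub]
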